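-- pv_equiv track=rewrite | github.com/RainonC/programmeerimise-alused | omamoodul.py | kustutamine
-- ===== SOURCE A (Python) =====
-- def kustutamine(nimi:str,p:list,i:list):
--     """Kustutame failist nime ja palga
--     """
--     n=i.count(nimi)
--     pos=0
--     for j in range(n):
--         ind=i.index(nimi,pos)
--         pos=ind
--         i.remove(nimi)
--         p.pop(ind)
--     return p,i
-- ===== SOURCE B (Python) =====
-- def kustutamine(nimi, p, i):
--     """Kustutame failist nime ja palga."""
--     indeksid = [k for k, x in enumerate(i) if x == nimi]
--     for k in reversed(indeksid):
--         del i[k]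
--         del p[k]
--     return p, i
-- ===== Notes on version B (the rewrite author's own statement) =====
-- stated objective: simpler
-- what changed: A repeatedly rescans the name list with count/index/remove and pops the salary list once per occurrence; B builds the list of matching indices in one enumerate pass and then deletes both lists at those indices in reverse order (so deletions do not shift pending indices). Pre_ excludes only inputs where some matching index is >= len(p), on which A raises IndexError.
import Mathlib
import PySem

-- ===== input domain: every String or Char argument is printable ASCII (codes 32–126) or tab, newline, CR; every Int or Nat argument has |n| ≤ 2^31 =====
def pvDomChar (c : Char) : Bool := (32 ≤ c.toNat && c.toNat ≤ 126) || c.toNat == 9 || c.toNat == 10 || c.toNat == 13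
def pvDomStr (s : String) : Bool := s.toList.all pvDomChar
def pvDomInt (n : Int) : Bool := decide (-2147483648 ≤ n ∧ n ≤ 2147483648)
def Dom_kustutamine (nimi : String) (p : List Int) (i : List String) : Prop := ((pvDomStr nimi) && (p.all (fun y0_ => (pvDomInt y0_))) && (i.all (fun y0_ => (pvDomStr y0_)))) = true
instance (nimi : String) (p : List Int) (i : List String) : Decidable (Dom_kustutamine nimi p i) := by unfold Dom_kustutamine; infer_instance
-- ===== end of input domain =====

-- B replaces A's repeated count/index/remove/pop scanning by one enumerate pass that
-- collects the matching indices, then deletes both lists at those indices in reverse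
-- order (simpler). Both mutate p and i in place in Python; the equivalence proved here
-- is about the RETURN value.

-- ===== PORT A =====
-- one iteration of A's 'for j in range(n)' body, over the loop state (pos, p, i)
def kustutamineStep (nimi : String) (st : Nat × List Int × List String) : Nat × List Int × List String :=
  let (pos, p, i) := st
  -- i.index(nimi, pos): hand port of list.index with a start argument (exact for 0 ≤ pos):
  -- search from pos, result is pos + offset; none = ValueError (unreachable: count guarantees a match)
  match PySem.List.index? (List.drop pos i) nimi with
  | none => (pos, p, i)
  | some d =>
    let ind := pos + d
    let i' := match PySem.List.remove? i nimi with        -- i.remove(nimi)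
              | some i' => i'
              | none => i
    match PySem.List.pop? p (ind : Int) with               -- p.pop(ind); none = IndexError, excluded by Pre_
    | none => (ind, p, i')
    | some (_, p') => (ind, p', i')

def kustutamine (nimi : String) (p : List Int) (i : List String) : List Int × List String :=
  let n := PySem.List.count i nimi
  let st := (List.range n).foldl (fun st _ => kustutamineStep nimi st) (0, p, i)
  (st.2.1, st.2.2)

-- ===== PORT B =====
-- one step of B's reverse-deletion loop: del p[k]; del i[k]
-- (the k < length guard makes 'del p[k]' total: out of range = IndexError, excluded by Pre_;
-- the indices collected from i itself are always in range for i)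
def pvDelStep (st : List Int × List String) (k : Nat) : List Int × List String :=
  (if k < st.1.length then st.1.eraseIdx k else st.1, st.2.eraseIdx k)

def kustutamine_alt (nimi : String) (p : List Int) (i : List String) : List Int × List String :=
  let indeksid := (i.zipIdx.filter (fun q => q.1 == nimi)).map Prod.snd
  indeksid.reverse.foldl pvDelStep (p, i)

-- ===== PRECONDITION & SPEC =====
-- Pre_ excludes exactly the inputs where A raises IndexError: some occurrence of nimi in i
-- sits at an index ≥ len(p), so the matching p.pop fails.
def Pre_kustutamine (nimi : String) (p : List Int) (i : List String) : Prop :=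
  ∀ q ∈ i.zipIdx, q.1 = nimi → q.2 < p.length
instance (nimi : String) (p : List Int) (i : List String) : Decidable (Pre_kustutamine nimi p i) := by unfold Pre_kustutamine; infer_instance

def pvWitness_kustutamine : String × List Int × List String := ("mari", [100, 200, 300], ["jaan", "mari", "kati"])

def Spec_kustutamine (nimi : String) (p : List Int) (i : List String) (out : List Int × List String) : Prop := out = kustutamine_alt nimi p i
instance (nimi : String) (p : List Int) (i : List String) (out : List Int × List String) : Decidable (Spec_kustutamine nimi p i out) := by unfold Spec_kustutamine; infer_instance

-- ===== CLAIM (what is proved, stated in full; the proofs are below) =====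
def Claim_equal_kustutamine : Prop := ∀ (nimi : String) (p : List Int) (i : List String), Dom_kustutamine nimi p i → Pre_kustutamine nimi p i → Spec_kustutamine nimi p i (kustutamine nimi p i)

-- ===== LEMMAS AND PROOFS =====

-- common characterisation of both results' p-component
def pvKeep (nimi : String) (p : List Int) (i : List String) : List Int :=
  ((p.zip i).filter (fun q => q.2 != nimi)).map Prod.fst ++ p.drop i.length

lemma pvKeep_of_not_mem (nimi : String) (p : List Int) (i : List String) (h : nimi ∉ i) :
    pvKeep nimi p i = p := by
  induction p generalizing i with
  | nil => simp [pvKeep]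
  | cons a p ih =>
    cases i with
    | nil => simp [pvKeep]
    | cons x i =>
      have hx : x ≠ nimi := fun e => h (e ▸ List.mem_cons_self)
      have := ih i (fun hm => h (List.mem_cons_of_mem _ hm))
      simpa [pvKeep, hx] using this

lemma pvKeep_step (nimi : String) (p1 p2 : List Int) (a : Int) (i1 i2 : List String)
    (hlen : p1.length = i1.length) (hne : nimi ∉ i1) :
    pvKeep nimi (p1 ++ a :: p2) (i1 ++ nimi :: i2) = pvKeep nimi (p1 ++ p2) (i1 ++ i2) := by
  induction p1 generalizing i1 with
  | nil =>
    cases i1 with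
    | nil => simp [pvKeep]
    | cons _ _ => simp at hlen
  | cons b p1 ih =>
    cases i1 with
    | nil => simp at hlen
    | cons y i1 =>
      have hy : y ≠ nimi := fun e => hne (e ▸ List.mem_cons_self)
      have hlen' : p1.length = i1.length := by simpa using hlen
      have := ih i1 hlen' (fun hm => hne (List.mem_cons_of_mem _ hm))
      simpa [pvKeep, hy] using this

lemma index?_not_mem_append (nimi : String) (l t : List String) (h : nimi ∉ l) :
    PySem.List.index? (l ++ nimi :: t) nimi = some l.length :=
  (PySem.List.index?_eq_some_iff _ _ _).mpr ⟨l, t, rfl, rfl, h⟩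

lemma kustutamine_loop_eq (nimi : String) :
    ∀ (n pos : Nat) (p : List Int) (i : List String),
      PySem.List.count i nimi = n →
      (∀ q ∈ i.zipIdx, q.1 = nimi → pos ≤ q.2) →
      (∀ q ∈ i.zipIdx, q.1 = nimi → q.2 < p.length) →
      ((kustutamineStep nimi)^[n] (pos, p, i)).2 =
        (pvKeep nimi p i, i.filter (fun x => x != nimi)) := by
  intro n
  induction n with
  | zero =>
    intro pos p i hcount _ _
    have hnm : nimi ∉ i := by
      have := (List.count_eq_zero).mp (by simpa [PySem.List.count_eq] using hcount)
      exact this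
    have hf : i.filter (fun x => x != nimi) = i :=
      List.filter_eq_self.mpr (fun x hx => by
        simp only [bne_iff_ne, ne_eq]
        exact fun e => hnm (e ▸ hx))
    simp [Function.iterate_zero, pvKeep_of_not_mem nimi p i hnm, hf]
  | succ n ih =>
    intro pos p i hcount hpos hpre
    -- nimi occurs in i
    have hmem : nimi ∈ i := by
      by_contra hnm
      have : PySem.List.count i nimi = 0 := by
        simp [PySem.List.count_eq, List.count_eq_zero, hnm]
      omega
    -- first-occurrence decomposition
    obtain ⟨k, hk⟩ : ∃ k, PySem.List.index? i nimi = some k :=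
      Option.isSome_iff_exists.mp ((PySem.List.index?_isSome_iff _ _).mpr hmem)
    obtain ⟨i1, i2, hi, hk1, hni1⟩ := (PySem.List.index?_eq_some_iff _ _ _).mp hk
    subst hi
    -- the occurrence of nimi at index i1.length
    have hq : ((nimi, i1.length) ∈ (i1 ++ nimi :: i2).zipIdx) := by
      rw [List.mem_zipIdx_iff_getElem?]
      rw [List.getElem?_append_right (le_refl _)]
      simp
    have hposle : pos ≤ i1.length := hpos _ hq rfl
    have hklt : i1.length < p.length := hpre _ hq rfl
    -- evaluate one step of A's loop
    have hidx : PySem.List.index? (List.drop pos (i1 ++ nimi :: i2)) nimi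
        = some (i1.length - pos) := by
      rw [List.drop_append_of_le_length hposle]
      have hnd : nimi ∉ List.drop pos i1 := fun h => hni1 (List.mem_of_mem_drop h)
      have := index?_not_mem_append nimi (List.drop pos i1) i2 hnd
      simpa [List.length_drop] using this
    have hrem : PySem.List.remove? (i1 ++ nimi :: i2) nimi = some (i1 ++ i2) := by
      rw [PySem.List.remove?_eq_some_erase _ nimi (by simp)]
      rw [List.erase_append_right _ hni1, List.erase_cons_head]
    have hind : pos + (i1.length - pos) = i1.length := by omega
    have hpop : PySem.List.pop? p ((i1.length : Nat) : Int)
        = some (p[i1.length]'hklt, p.eraseIdx i1.length) :=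
      PySem.List.pop?_natCast p i1.length hklt
    have hstep : kustutamineStep nimi (pos, p, i1 ++ nimi :: i2)
        = (i1.length, p.eraseIdx i1.length, i1 ++ i2) := by
      simp only [kustutamineStep, hidx, hrem, hind, hpop]
    -- decompose p at index i1.length
    set p1 : List Int := p.take i1.length with hp1
    set p2 : List Int := p.drop (i1.length + 1) with hp2
    have hpdec : p = p1 ++ p[i1.length]'hklt :: p2 := by
      conv_lhs => rw [← List.take_append_drop i1.length p, List.drop_eq_getElem_cons hklt]
    have hp1len : p1.length = i1.length := by
      simp [hp1, List.length_take, Nat.min_eq_left (Nat.le_of_lt hklt)]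
    have herase : p.eraseIdx i1.length = p1 ++ p2 :=
      List.eraseIdx_eq_take_drop_succ p i1.length
    -- count decreases by one
    have hcount' : PySem.List.count (i1 ++ i2) nimi = n := by
      have h1 : PySem.List.count (i1 ++ nimi :: i2) nimi = n + 1 := hcount
      simp only [PySem.List.count_eq, List.count_append, List.count_cons] at h1 ⊢
      have hz : List.count nimi i1 = 0 := List.count_eq_zero.mpr hni1
      simp [hz] at h1 ⊢
      omega
    -- occurrences in i1 ++ i2 sit at index ≥ i1.length …
    have hpos' : ∀ q ∈ (i1 ++ i2).zipIdx, q.1 = nimi → i1.length ≤ q.2 := by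
      intro q hqm hqe
      rw [List.mem_zipIdx_iff_getElem?] at hqm
      by_contra hlt
      rw [List.getElem?_append, if_pos (by omega)] at hqm
      obtain ⟨h2, he⟩ := List.getElem?_eq_some_iff.mp hqm
      exact hni1 (hqe ▸ he ▸ List.getElem_mem _)
    -- … and still below the shrunken p's length
    have hpre' : ∀ q ∈ (i1 ++ i2).zipIdx, q.1 = nimi → q.2 < (p1 ++ p2).length := by
      intro q hqm hqe
      have hge := hpos' q hqm hqe
      rw [List.mem_zipIdx_iff_getElem?, List.getElem?_append_right hge] at hqm
      have horig : ((nimi, q.2 + 1) ∈ (i1 ++ nimi :: i2).zipIdx) := by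
        rw [List.mem_zipIdx_iff_getElem?]
        rw [List.getElem?_append_right (by omega)]
        have : q.2 + 1 - i1.length = (q.2 - i1.length) + 1 := by omega
        rw [this]
        simpa [hqe] using hqm
      have := hpre _ horig rfl
      have hlen2 : (p1 ++ p2).length = p.length - 1 := by
        rw [← herase, List.length_eraseIdx_of_lt hklt]
      omega
    have hrec := ih i1.length (p1 ++ p2) (i1 ++ i2) hcount' hpos' hpre'
    rw [Function.iterate_succ_apply, hstep, herase, hrec]
    -- transport the common value back across the deleted pair
    have hkeep : pvKeep nimi p (i1 ++ nimi :: i2) = pvKeep nimi (p1 ++ p2) (i1 ++ i2) := by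
      conv_lhs => rw [hpdec]
      exact pvKeep_step nimi p1 p2 _ i1 i2 hp1len hni1
    rw [hkeep]
    simp [List.filter_append]

lemma foldl_range_iterate {α : Type} (f : α → α) :
    ∀ (n : Nat) (s : α), (List.range n).foldl (fun st _ => f st) s = f^[n] s := by
  intro n
  induction n with
  | zero => intro s; simp
  | succ n ih =>
    intro s
    rw [List.range_succ, List.foldl_append]
    simp [ih, Function.iterate_succ_apply']

-- ---- B side ----

-- B's index list
def pvIdxs (nimi : String) (i : List String) : List Nat :=
  (i.zipIdx.filter (fun q => q.1 == nimi)).map Prod.snd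

lemma pvIdxs_cons (nimi x : String) (i : List String) :
    pvIdxs nimi (x :: i) =
      (if x == nimi then [0] else []) ++ (pvIdxs nimi i).map (· + 1) := by
  unfold pvIdxs
  rw [List.zipIdx_cons, List.zipIdx_succ]
  by_cases h : x == nimi <;>
    simp [h, List.filter_map, List.map_map, Function.comp_def]

lemma pvIdxs_of_not_mem (nimi : String) (i : List String) (h : nimi ∉ i) :
    pvIdxs nimi i = [] := by
  unfold pvIdxs
  rw [List.map_eq_nil_iff, List.filter_eq_nil_iff]
  intro q hq
  rw [List.mem_zipIdx_iff_getElem?] at hq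
  have hm : q.1 ∈ i := (List.getElem?_eq_some_iff.mp hq).2 ▸ List.getElem_mem _
  simp only [beq_iff_eq]
  exact fun e => h (e ▸ hm)

-- deleting at shifted indices leaves the heads alone
lemma pvDelStep_succ (a : Int) (p : List Int) (x : String) (i : List String) (k : Nat) :
    pvDelStep (a :: p, x :: i) (k + 1) =
      (a :: (pvDelStep (p, i) k).1, x :: (pvDelStep (p, i) k).2) := by
  unfold pvDelStep
  by_cases h : k < p.length <;> simp [h]

lemma foldl_pvDelStep_shift (l : List Nat) :
    ∀ (a : Int) (p : List Int) (x : String) (i : List String),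
      (l.map (· + 1)).foldl pvDelStep (a :: p, x :: i) =
        (a :: (l.foldl pvDelStep (p, i)).1, x :: (l.foldl pvDelStep (p, i)).2) := by
  induction l with
  | nil => intro a p x i; simp
  | cons k l ih =>
    intro a p x i
    simp only [List.map_cons, List.foldl_cons, pvDelStep_succ]
    exact ih a _ x _

lemma kustutamine_alt_eq (nimi : String) :
    ∀ (i : List String) (p : List Int),
      (∀ q ∈ i.zipIdx, q.1 = nimi → q.2 < p.length) →
      (pvIdxs nimi i).reverse.foldl pvDelStep (p, i) =
        (pvKeep nimi p i, i.filter (fun x => x != nimi)) := by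
  intro i
  induction i with
  | nil => intro p _; simp [pvIdxs, pvKeep]
  | cons x i ih =>
    intro p hpre
    -- the tail's occurrences satisfy the shrunken precondition when p = a :: p'
    by_cases hx : x = nimi
    · -- head matches: Pre_ forces p nonempty
      have h0 : ((x, 0) ∈ (x :: i).zipIdx) := by
        rw [List.mem_zipIdx_iff_getElem?]; simp
      have hplen : 0 < p.length := hpre _ h0 hx
      obtain ⟨a, p', rfl⟩ : ∃ a p', p = a :: p' := by
        cases p with
        | nil => simp at hplen
        | cons a p' => exact ⟨a, p', rfl⟩
      have hpre' : ∀ q ∈ i.zipIdx, q.1 = nimi → q.2 < p'.length := by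
        intro q hq hqe
        have : ((q.1, q.2 + 1) ∈ (x :: i).zipIdx) := by
          rw [List.mem_zipIdx_iff_getElem?] at hq ⊢
          simpa using hq
        have := hpre _ this hqe
        simpa using this
      have hr := ih p' hpre'
      rw [pvIdxs_cons]
      rw [if_pos (by simp [hx])]
      simp only [List.reverse_append, List.reverse_cons, List.reverse_nil,
        List.nil_append, List.foldl_append, ← List.map_reverse]
      rw [foldl_pvDelStep_shift, hr]
      simp [pvDelStep, pvKeep, hx]
    · -- head differs
      rw [pvIdxs_cons]
      have hxb : (x == nimi) = false := by simp [hx]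
      simp only [hxb, if_neg, Bool.false_eq_true, not_false_iff, List.nil_append]
      cases p with
      | nil =>
        -- Pre_ forces nimi ∉ i (no index < 0), so nothing is deleted
        have hnm : nimi ∉ i := by
          intro hm
          obtain ⟨k, hlt, he⟩ := List.getElem_of_mem hm
          have : ((nimi, k + 1) ∈ (x :: i).zipIdx) := by
            rw [List.mem_zipIdx_iff_getElem?]
            simpa using List.getElem?_eq_some_iff.mpr ⟨hlt, he⟩
          have := hpre _ this rfl
          simp at this
        rw [pvIdxs_of_not_mem nimi i hnm]
        have hf : i.filter (fun y => y != nimi) = i :=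
          List.filter_eq_self.mpr (fun y hy => by
            simp only [bne_iff_ne, ne_eq]
            exact fun e => hnm (e ▸ hy))
        simp [pvKeep, hx, hf]
      | cons a p' =>
        have hpre' : ∀ q ∈ i.zipIdx, q.1 = nimi → q.2 < p'.length := by
          intro q hq hqe
          have : ((q.1, q.2 + 1) ∈ (x :: i).zipIdx) := by
            rw [List.mem_zipIdx_iff_getElem?] at hq ⊢
            simpa using hq
          have := hpre _ this hqe
          simpa using this
        have hr := ih p' hpre'
        rw [← List.map_reverse, foldl_pvDelStep_shift, hr]
        simp [pvKeep, hx]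

-- ===== VERDICT (by name: the statement is the Claim_ definition above) =====
theorem kustutamine_spec : Claim_equal_kustutamine := by
  intro nimi p i _ hpre
  unfold Spec_kustutamine kustutamine kustutamine_alt
  simp only [foldl_range_iterate]
  rw [kustutamine_loop_eq nimi _ 0 p i rfl (fun q _ _ => Nat.zero_le _) hpre]
  exact (kustutamine_alt_eq nimi i p hpre).symm
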